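-- pv_equiv track=rewrite | github.com/SeyoungJeon/Algorithm_Python | Problem/Programmers/2019_Kakao/후보키.py | solution
-- ===== SOURCE A (Python) =====
-- from itertools import combinations
--
-- def solution(relation):
--     answer = 0
--
--     elements_list = []
--     idx_list = [i for i in range(len(relation[0]))]
--
--     for i in range(1, len(relation[0])):
--         combinations_list = list(combinations(idx_list, i))
--
--         for elements in combinations_list:
--             data_set = set()
--             for value in relation:
--                 data_set.add(tuple([value[element] for element in elements]))
--
--             if len(data_set) == len(relation):
--                 elements_list.append([elements, False])
--
--     for idx in range(0, len(elements_list)):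
--         if elements_list[idx][1]:
--             continue
--
--         for idx2 in range(idx+1, len(elements_list)):
--             for element in elements_list[idx][0]:
--                 if element in elements_list[idx2][0]:
--                     elements_list[idx2][1] = True
--                     break
--     for value in elements_list:
--         if not value[1]:
--             answer += 1
--
--     return answer
-- ===== SOURCE B (Python) =====
-- from itertools import combinations
--
-- def solution(relation):
--     cols = len(relation[0])
--     # bitmask of columns on which a pair of rows agrees, for every pair of rows
--     agree = []
--     for r1, r2 in combinations(relation, 2):
--         am = 0
--         for c in range(cols):
--             if r1[c] == r2[c]:
--                 am |= 1 << c
--         agree.append(am)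
--     answer = 0
--     used = 0  # union of the columns of all keys counted so far
--     for size in range(1, cols):
--         for cand in combinations(range(cols), size):
--             mask = 0
--             for c in cand:
--                 mask |= 1 << c
--             # unique iff no row pair agrees on all of cand's columns;
--             # counted iff additionally no column is shared with an earlier counted key
--             if all(mask & am != mask for am in agree) and mask & used == 0:
--                 answer += 1
--                 used |= mask
--     return answer
-- ===== Notes on version B (the rewrite author's own statement) =====
-- stated objective: alternative
-- what changed: B replaces A's per-candidate projection-tuple sets and its collect/mark/count passes by a bitmask algorithm: it precomputes one column-agreement bitmask per pair of rows, decides uniqueness of a candidate by 'no agreement mask contains the candidate mask', and replaces the accepted-key marking loops by a single used-columns bitmask.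
-- outside the precondition, e.g. on solution([['a'], []]): A returns 0, B raises IndexError
import Mathlib
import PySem

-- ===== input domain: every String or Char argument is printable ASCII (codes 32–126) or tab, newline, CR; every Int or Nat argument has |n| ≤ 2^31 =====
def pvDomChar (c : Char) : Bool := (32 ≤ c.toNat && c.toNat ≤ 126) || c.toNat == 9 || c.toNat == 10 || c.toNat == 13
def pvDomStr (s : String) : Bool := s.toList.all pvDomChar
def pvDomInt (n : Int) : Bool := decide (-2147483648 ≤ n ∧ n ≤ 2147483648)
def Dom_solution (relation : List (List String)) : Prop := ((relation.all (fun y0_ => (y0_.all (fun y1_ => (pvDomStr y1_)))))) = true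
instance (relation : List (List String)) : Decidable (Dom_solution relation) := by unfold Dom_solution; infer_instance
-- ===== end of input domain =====

-- one honest line: B decides uniqueness via per-row-pair column-agreement bitmasks and
-- replaces A's marking passes by a used-columns bitmask (alternative algorithm, similar cost).

-- ===== PORT A =====

-- itertools.combinations(xs, k) in Python's lexicographic order (shared library call)
def pvCombs : Nat → List Nat → List (List Nat)
  | 0, _ => [[]]
  | _ + 1, [] => []
  | k + 1, x :: xs => (pvCombs k xs).map (fun c => x :: c) ++ pvCombs (k + 1) xs

-- tuple(value[element] for element in elements); indices are in range under Pre_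
def pvProj (elems : List Nat) (row : List String) : List String :=
  elems.map (fun e => row.getD e "")

-- the idx/idx2 forward-marking double loop on elements_list, as structural recursion
def pvMark : List (List Nat × Bool) → List (List Nat × Bool)
  | [] => []
  | (k, m) :: rest =>
      (k, m) ::
        pvMark (if m then rest
                else rest.map (fun p => (p.1, p.2 || k.any (fun e => p.1.contains e))))
  termination_by l => l.length
  decreasing_by simp; split <;> simp

def solution (relation : List (List String)) : Int :=
  let answer : Int := 0
  let cols := relation.headI.length
  let idx_list := List.range cols
  let elements_list : List (List Nat × Bool) :=
    (List.range' 1 (cols - 1)).foldl (fun el i =>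
      (pvCombs i idx_list).foldl (fun el elems =>
        let data_set :=
          relation.foldl (fun s row => PySem.Set.add s (pvProj elems row))
            (PySem.Set.ofList [])
        if data_set.length = relation.length then el ++ [(elems, false)] else el) el) []
  let marked := pvMark elements_list
  marked.foldl (fun a p => if p.2 then a else a + 1) answer

-- ===== PORT B =====

-- combinations(relation, 2): all pairs of rows in order
def pvPairs : List (List String) → List (List String × List String)
  | [] => []
  | x :: xs => (xs.map (fun y => (x, y))) ++ pvPairs xs

-- am |= 1 << c for the columns c < cols where the two rows agree
def pvAgreeMask (cols : Nat) (r1 r2 : List String) : Nat :=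
  (List.range cols).foldl
    (fun am c => if r1.getD c "" = r2.getD c "" then am ||| 2 ^ c else am) 0

-- mask |= 1 << c over the candidate's columns
def pvMaskOf (cand : List Nat) : Nat := cand.foldl (fun m c => m ||| 2 ^ c) 0

def solution_alt (relation : List (List String)) : Int :=
  let cols := relation.headI.length
  let agree := (pvPairs relation).map (fun p => pvAgreeMask cols p.1 p.2)
  let res : Int × Nat :=
    (List.range' 1 (cols - 1)).foldl (fun st size =>
      (pvCombs size (List.range cols)).foldl (fun (st : Int × Nat) cand =>
        if (agree.all fun am => !(pvMaskOf cand &&& am == pvMaskOf cand))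
            && (pvMaskOf cand &&& st.2 == 0) then
          (st.1 + 1, st.2 ||| pvMaskOf cand)
        else st) st) ((0 : Int), 0)
  res.1

-- ===== PRECONDITION & SPEC =====
-- Pre_ excludes exactly the inputs where a port's Python raises IndexError: the empty
-- relation (A's relation[0]) and rows shorter than the first row (indexed by A for
-- cols ≥ 2 and by B's pair loop for cols ≥ 1).
def Pre_solution (relation : List (List String)) : Prop :=
  relation ≠ [] ∧ ∀ r ∈ relation, relation.headI.length ≤ r.length
instance (relation : List (List String)) : Decidable (Pre_solution relation) := by
  unfold Pre_solution; infer_instance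

def pvWitness_solution : List (List String) := [["a", "b"], ["a", "c"]]

def Spec_solution (relation : List (List String)) (out : Int) : Prop := out = solution_alt relation
instance (relation : List (List String)) (out : Int) : Decidable (Spec_solution relation out) := by unfold Spec_solution; infer_instance

-- ===== CLAIM (what is proved, stated in full; the proofs are below) =====
def Claim_equal_solution : Prop := ∀ (relation : List (List String)), Dom_solution relation → Pre_solution relation → Spec_solution relation (solution relation)

-- ===== LEMMAS AND PROOFS =====

-- ---- A-side normalisation (elements_list, marking, counting) ----

-- overlap of a candidate with one accepted key, and with any of them
def pvOver (acc : List (List Nat)) (k : List Nat) : Bool :=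
  acc.any (fun a => a.any (fun e => k.contains e))

theorem pvAny_contains_comm (a k : List Nat) :
    a.any (fun e => k.contains e) = k.any (fun e => a.contains e) := by
  rw [Bool.eq_iff_iff]
  simp only [List.any_eq_true, List.contains_eq_mem, decide_eq_true_eq]
  exact ⟨fun ⟨e, ha, hk⟩ => ⟨e, hk, ha⟩, fun ⟨e, hk, ha⟩ => ⟨e, ha, hk⟩⟩

theorem pvIsdisjoint_eq (k a : List Nat) :
    PySem.Set.isdisjoint (PySem.Set.ofList k) a = !(a.any (fun e => k.contains e)) := by
  rw [pvAny_contains_comm, Bool.eq_iff_iff]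
  simp only [Bool.not_eq_eq_eq_not, Bool.not_true, List.any_eq_false, List.contains_eq_mem,
    decide_eq_false_iff_not, Bool.not_eq_true]
  rw [PySem.Set.isdisjoint_iff]
  simp only [PySem.Set.mem_ofList]

-- B-side reference condition = negation of A's overlap test
theorem pvDisjoint_eq (acc : List (List Nat)) (k : List Nat) :
    (acc.all (fun key => PySem.Set.isdisjoint (PySem.Set.ofList k) key)) = !(pvOver acc k) := by
  induction acc with
  | nil => rfl
  | cons a rest ih =>
    simp only [List.all_cons, pvOver, List.any_cons, Bool.not_or] at *
    rw [ih, pvIsdisjoint_eq]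

theorem pvOver_append (acc : List (List Nat)) (k k' : List Nat) :
    pvOver (acc ++ [k]) k' = (pvOver acc k' || k.any (fun e => k'.contains e)) := by
  simp [pvOver, List.any_append]

-- core: A's marking pass then counting equals a greedy accepted-list fold
theorem pvCore (K : List (List Nat)) : ∀ (acc : List (List Nat)) (n : Int),
    (pvMark (K.map (fun k => (k, pvOver acc k)))).foldl
        (fun a p => if p.2 then a else a + 1) n
      = (K.foldl (fun (st : Int × List (List Nat)) cand =>
          if st.2.all (fun key => PySem.Set.isdisjoint (PySem.Set.ofList cand) key) then
            (st.1 + 1, st.2 ++ [cand])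
          else st) (n, acc)).1 := by
  induction K with
  | nil => intro acc n; simp [pvMark]
  | cons k K' ih =>
    intro acc n
    rw [List.map_cons, pvMark, List.foldl_cons, List.foldl_cons, pvDisjoint_eq]
    cases h : pvOver acc k with
    | true =>
      simp only [if_true, Bool.not_true, Bool.false_eq_true, if_false]
      exact ih acc n
    | false =>
      simp only [if_false, Bool.not_false, if_true, Bool.false_eq_true]
      have hmap : (K'.map (fun k' => (k', pvOver acc k'))).map
          (fun p => (p.1, p.2 || k.any (fun e => p.1.contains e)))
          = K'.map (fun k' => (k', pvOver (acc ++ [k]) k')) := by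
        rw [List.map_map]
        apply List.map_congr_left
        intro k' _
        simp [pvOver_append]
      rw [hmap]
      exact ih (acc ++ [k]) (n + 1)

-- the uniqueness test, after set normalisation
def pvUniq (relation : List (List String)) (elems : List Nat) : Bool :=
  (PySem.Set.ofList (relation.map (fun row => pvProj elems row))).length = relation.length

-- A builds its set by repeated .add: same set as set(list)
theorem pvSet_eq (relation : List (List String)) (elems : List Nat) :
    relation.foldl (fun s row => PySem.Set.add s (pvProj elems row)) (PySem.Set.ofList [])
      = PySem.Set.ofList (relation.map (fun row => pvProj elems row)) := by
  have h0 : PySem.Set.ofList ([] : List (List String)) = [] := rfl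
  rw [h0, PySem.Set.ofList_eq_foldl, List.foldl_map]

-- A's inner combination loop collects the unique candidates of one size
theorem pvA_inner (relation : List (List String)) (cs : List (List Nat)) :
    ∀ (el : List (List Nat × Bool)),
    cs.foldl (fun el elems =>
        if (relation.foldl (fun s row => PySem.Set.add s (pvProj elems row))
            (PySem.Set.ofList [])).length = relation.length
        then el ++ [(elems, false)] else el) el
      = el ++ (cs.filter (pvUniq relation)).map (fun k => (k, false)) := by
  intro el
  have hfun : (fun (el : List (List Nat × Bool)) (elems : List Nat) =>
      if (relation.foldl (fun s row => PySem.Set.add s (pvProj elems row))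
          (PySem.Set.ofList [])).length = relation.length
      then el ++ [(elems, false)] else el)
      = (fun (el : List (List Nat × Bool)) (elems : List Nat) =>
          if pvUniq relation elems then el ++ [(elems, false)] else el) := by
    funext a elems
    rw [pvSet_eq]
    by_cases h : (PySem.Set.ofList (relation.map fun row => pvProj elems row)).length
        = relation.length <;> simp [pvUniq, h]
  rw [hfun, PySem.List.foldl_append_if]

-- A's candidate-collection double loop flattened
theorem pvA_collect (idx : List Nat) (relation : List (List String)) (L : List Nat) :
    ∀ (el0 : List (List Nat × Bool)),
    L.foldl (fun el i =>
      (pvCombs i idx).foldl (fun el elems =>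
        if (relation.foldl (fun s row => PySem.Set.add s (pvProj elems row))
            (PySem.Set.ofList [])).length = relation.length
        then el ++ [(elems, false)] else el) el) el0
    = el0 ++ ((L.flatMap (fun i => pvCombs i idx)).filter (pvUniq relation)).map
        (fun k => (k, false)) := by
  induction L with
  | nil => intro el0; simp
  | cons i L' ih =>
    intro el0
    rw [List.foldl_cons, List.flatMap_cons, List.filter_append, List.map_append,
      ← List.append_assoc, pvA_inner, ih]

-- ---- B-side bitmask characterisations ----

theorem pvMaskOf_testBit_aux (cand : List Nat) (i : Nat) : ∀ (a : Nat),
    (cand.foldl (fun m c => m ||| 2 ^ c) a).testBit i = (a.testBit i || cand.contains i) := by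
  induction cand with
  | nil => intro a; simp
  | cons c cs ih =>
    intro a
    rw [List.foldl_cons, ih, Nat.testBit_or, Nat.testBit_two_pow]
    simp [List.contains_eq_mem, Bool.decide_or, eq_comm, Bool.or_assoc]

theorem pvMaskOf_testBit (cand : List Nat) (i : Nat) :
    (pvMaskOf cand).testBit i = cand.contains i := by
  unfold pvMaskOf
  rw [pvMaskOf_testBit_aux]
  simp

theorem pvAgreeMask_testBit (cols : Nat) (r1 r2 : List String) (i : Nat) :
    (pvAgreeMask cols r1 r2).testBit i
      = (decide (i < cols) && decide (r1.getD i "" = r2.getD i "")) := by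
  unfold pvAgreeMask
  have hfun : (fun (am : Nat) (c : Nat) =>
      if r1.getD c "" = r2.getD c "" then am ||| 2 ^ c else am)
      = (fun (am : Nat) (c : Nat) =>
          if (fun c => decide (r1.getD c "" = r2.getD c "")) c = true
          then am ||| 2 ^ c else am) := by
    funext am c
    simp
  rw [hfun, ← List.foldl_filter]
  rw [pvMaskOf_testBit_aux]
  rw [Bool.eq_iff_iff]
  simp [List.mem_filter]

theorem pvLand_self_iff (x y : Nat) :
    x &&& y = x ↔ ∀ i, x.testBit i = true → y.testBit i = true := by
  constructor
  · intro h i hx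
    have := congrArg (fun n => n.testBit i) h
    simp only [Nat.testBit_land, hx] at this
    exact this
  · intro h
    apply Nat.eq_of_testBit_eq
    intro i
    rw [Nat.testBit_land]
    cases hx : x.testBit i with
    | false => simp
    | true => simp [h i hx]

theorem pvLand_zero_iff (x y : Nat) :
    x &&& y = 0 ↔ ∀ i, x.testBit i = true → y.testBit i = false := by
  constructor
  · intro h i hx
    have := congrArg (fun n => n.testBit i) h
    simp only [Nat.testBit_land, hx, Bool.true_and, Nat.zero_testBit] at this
    exact this
  · intro h
    apply Nat.eq_of_testBit_eq
    intro i
    rw [Nat.testBit_land, Nat.zero_testBit]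
    cases hx : x.testBit i with
    | false => simp
    | true => simp [h i hx]

-- the used-columns mask of an accepted list
def pvUsedOf (acc : List (List Nat)) : Nat := acc.foldl (fun u k => u ||| pvMaskOf k) 0

theorem pvUsedOf_testBit_aux (acc : List (List Nat)) (i : Nat) : ∀ (a : Nat),
    (acc.foldl (fun u k => u ||| pvMaskOf k) a).testBit i
      = (a.testBit i || acc.any (fun k => k.contains i)) := by
  induction acc with
  | nil => intro a; simp
  | cons k ks ih =>
    intro a
    rw [List.foldl_cons, ih, Nat.testBit_or, pvMaskOf_testBit, List.any_cons,
      Bool.or_assoc]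

theorem pvUsedOf_testBit (acc : List (List Nat)) (i : Nat) :
    (pvUsedOf acc).testBit i = acc.any (fun k => k.contains i) := by
  unfold pvUsedOf
  rw [pvUsedOf_testBit_aux]
  simp

theorem pvUsedOf_append (acc : List (List Nat)) (k : List Nat) :
    pvUsedOf (acc ++ [k]) = pvUsedOf acc ||| pvMaskOf k := by
  unfold pvUsedOf
  rw [List.foldl_append, List.foldl_cons, List.foldl_nil]

-- every candidate produced by pvCombs is a sublist of the index pool
theorem pvCombs_sublist (l : List Nat) : ∀ (k : Nat) (c : List Nat),
    c ∈ pvCombs k l → c.Sublist l := by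
  induction l with
  | nil =>
    intro k c h
    cases k with
    | zero => simp [pvCombs] at h; simp [h]
    | succ k => simp [pvCombs] at h
  | cons x xs ih =>
    intro k c h
    cases k with
    | zero => simp [pvCombs] at h; simp [h]
    | succ k =>
      rw [pvCombs, List.mem_append] at h
      rcases h with h | h
      · obtain ⟨c', hc', rfl⟩ := List.mem_map.mp h
        exact (ih k c' hc').cons₂ x
      · exact (ih (k + 1) c h).cons x

-- pvPairs enumerates exactly the Pairwise pairs
theorem pvPairs_all (q : List String → List String → Bool) (l : List (List String)) :
    ((pvPairs l).all (fun p => q p.1 p.2) = true) ↔ l.Pairwise (fun a b => q a b = true) := by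
  induction l with
  | nil => simp [pvPairs]
  | cons x xs ih =>
    rw [pvPairs, List.all_append, List.pairwise_cons, Bool.and_eq_true, ih]
    simp [List.all_map, List.all_eq_true, and_comm]

-- set(list) keeps the length exactly when the list has no duplicates
theorem pvOfList_length_eq_iff {α : Type} [BEq α] [LawfulBEq α] (xs : List α) :
    (PySem.Set.ofList xs).length = xs.length ↔ xs.Nodup := by
  induction xs using List.reverseRecOn with
  | nil => simp [PySem.Set.ofList]
  | append_singleton ys y ih =>
    rw [PySem.Set.ofList_append_singleton]
    by_cases hy : y ∈ ys
    · rw [PySem.Set.add_of_mem (by rw [PySem.Set.mem_ofList]; exact hy)]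
      have hle := PySem.Set.length_ofList_le (xs := ys)
      simp only [List.length_append, List.length_cons, List.length_nil]
      constructor
      · intro h; omega
      · intro h
        exact absurd rfl ((List.nodup_append.mp h).2.2 y hy y (List.mem_singleton_self y))
    · rw [PySem.Set.add_of_not_mem (by rw [PySem.Set.mem_ofList]; exact hy)]
      simp only [List.length_append, List.length_cons, List.length_nil, List.nodup_append]
      constructor
      · intro h
        have hlen : (PySem.Set.ofList ys).length = ys.length := by omega
        refine ⟨ih.mp hlen, List.nodup_singleton y, ?_⟩
        intro a ha b hb
        rw [List.mem_singleton] at hb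
        subst hb
        intro hab
        exact hy (hab ▸ ha)
      · rintro ⟨h1, -, -⟩
        have := ih.mpr h1
        omega

-- the single-pair test: the candidate mask lies inside the agreement mask exactly
-- when the two rows have equal projections on the candidate's columns
theorem pvPair_iff (cols : Nat) (cand : List Nat) (hc : cand.Sublist (List.range cols))
    (r1 r2 : List String) :
    pvMaskOf cand &&& pvAgreeMask cols r1 r2 = pvMaskOf cand
      ↔ pvProj cand r1 = pvProj cand r2 := by
  rw [pvLand_self_iff]
  constructor
  · intro h
    apply List.map_congr_left
    intro c hcm
    have hb := h c (by rw [pvMaskOf_testBit, List.contains_eq_mem]; exact decide_eq_true hcm)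
    rw [pvAgreeMask_testBit] at hb
    simp only [Bool.and_eq_true, decide_eq_true_eq] at hb
    exact hb.2
  · intro h i hbit
    rw [pvMaskOf_testBit, List.contains_eq_mem, decide_eq_true_eq] at hbit
    have hlt : i < cols := List.mem_range.mp (hc.subset hbit)
    have heq : r1.getD i "" = r2.getD i "" := List.map_inj_left.mp h i hbit
    rw [pvAgreeMask_testBit]
    simp only [hlt, decide_true, Bool.true_and, decide_eq_true_eq]
    exact heq

-- B's agreement-mask test equals A's projection-set test
theorem pvUniq_eq (relation : List (List String)) (cols : Nat) (cand : List Nat)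
    (hc : cand.Sublist (List.range cols)) :
    ((pvPairs relation).map (fun p => pvAgreeMask cols p.1 p.2)).all
        (fun am => !(pvMaskOf cand &&& am == pvMaskOf cand))
      = pvUniq relation cand := by
  have hmap : ((pvPairs relation).map (fun p => pvAgreeMask cols p.1 p.2)).all
      (fun am => !(pvMaskOf cand &&& am == pvMaskOf cand))
      = (pvPairs relation).all
          (fun p => !(pvMaskOf cand &&& pvAgreeMask cols p.1 p.2 == pvMaskOf cand)) := by
    rw [List.all_map]; rfl
  have hR : pvUniq relation cand = true ↔
      relation.Pairwise (fun a b => pvProj cand a ≠ pvProj cand b) := by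
    unfold pvUniq
    rw [decide_eq_true_iff]
    rw [show relation.length = (relation.map (fun row => pvProj cand row)).length by
      rw [List.length_map]]
    rw [pvOfList_length_eq_iff]
    exact List.pairwise_map
  rw [Bool.eq_iff_iff, hmap, hR]
  refine Iff.trans
    (pvPairs_all (fun a b => !(pvMaskOf cand &&& pvAgreeMask cols a b == pvMaskOf cand))
      relation) ?_
  constructor
  · refine fun h => h.imp (fun {a b} hab => ?_)
    simp only [Bool.not_eq_eq_eq_not, Bool.not_true, beq_eq_false_iff_ne, ne_eq] at hab
    exact fun he => hab ((pvPair_iff cols cand hc a b).mpr he)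
  · refine fun h => h.imp (fun {a b} hab => ?_)
    simp only [Bool.not_eq_eq_eq_not, Bool.not_true, beq_eq_false_iff_ne, ne_eq]
    exact fun he => hab ((pvPair_iff cols cand hc a b).mp he)

-- B's used-mask test equals the accepted-list disjointness test
theorem pvDisjB_eq (cand : List Nat) (acc : List (List Nat)) :
    (pvMaskOf cand &&& pvUsedOf acc == 0)
      = acc.all (fun key => PySem.Set.isdisjoint (PySem.Set.ofList cand) key) := by
  rw [Bool.eq_iff_iff, beq_iff_eq, pvLand_zero_iff, List.all_eq_true]
  constructor
  · intro h key hk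
    rw [PySem.Set.isdisjoint_iff]
    intro x hx
    rw [PySem.Set.mem_ofList] at hx
    have hb := h x (by rw [pvMaskOf_testBit, List.contains_eq_mem]; exact decide_eq_true hx)
    rw [pvUsedOf_testBit, List.any_eq_false] at hb
    intro hxk
    exact hb key hk (by rw [List.contains_eq_mem]; exact decide_eq_true hxk)
  · intro h i hbit
    rw [pvMaskOf_testBit, List.contains_eq_mem, decide_eq_true_eq] at hbit
    rw [pvUsedOf_testBit, List.any_eq_false]
    intro k hk
    have hd := h k hk
    rw [PySem.Set.isdisjoint_iff] at hd
    have hni := hd i (by rw [PySem.Set.mem_ofList]; exact hbit)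
    rw [List.contains_eq_mem]
    simpa using hni

-- bridge: B's single-mask greedy fold equals the accepted-list greedy fold on the
-- unique candidates, for any stream of candidates drawn from the column pool
theorem pvBridge (relation : List (List String)) (cols : Nat) (S : List (List Nat))
    (hS : ∀ c ∈ S, c.Sublist (List.range cols)) :
    ∀ (acc : List (List Nat)) (n : Int),
    (S.foldl (fun (st : Int × Nat) cand =>
        if (((pvPairs relation).map (fun p => pvAgreeMask cols p.1 p.2)).all
              fun am => !(pvMaskOf cand &&& am == pvMaskOf cand))
            && (pvMaskOf cand &&& st.2 == 0) then
          (st.1 + 1, st.2 ||| pvMaskOf cand)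
        else st) (n, pvUsedOf acc)).1
      = ((S.filter (pvUniq relation)).foldl
          (fun (st : Int × List (List Nat)) cand =>
            if st.2.all (fun key => PySem.Set.isdisjoint (PySem.Set.ofList cand) key) then
              (st.1 + 1, st.2 ++ [cand])
            else st) (n, acc)).1 := by
  revert hS
  induction S with
  | nil => intro _ acc n; rfl
  | cons cand S' ih =>
    intro hS acc n
    have hc := hS cand (List.mem_cons_self)
    have hS' : ∀ c ∈ S', c.Sublist (List.range cols) :=
      fun c hm => hS c (List.mem_cons_of_mem cand hm)
    rw [List.foldl_cons, List.filter_cons, pvUniq_eq relation cols cand hc, pvDisjB_eq]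
    cases hu : pvUniq relation cand with
    | false =>
      simp only [Bool.false_and, Bool.false_eq_true, if_false]
      exact ih hS' acc n
    | true =>
      simp only [Bool.true_and, if_true]
      rw [List.foldl_cons]
      cases hd : acc.all (fun key => PySem.Set.isdisjoint (PySem.Set.ofList cand) key) with
      | false =>
        simp only [Bool.false_eq_true, if_false]
        exact ih hS' acc n
      | true =>
        simp only [if_true]
        rw [← pvUsedOf_append]
        exact ih hS' (acc ++ [cand]) (n + 1)

-- B's double loop flattened to a single fold over the candidate stream
theorem pvB_collect (relation : List (List String)) (cols : Nat) (L : List Nat) :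
    ∀ (st0 : Int × Nat),
    L.foldl (fun st size =>
      (pvCombs size (List.range cols)).foldl (fun (st : Int × Nat) cand =>
        if (((pvPairs relation).map (fun p => pvAgreeMask cols p.1 p.2)).all
              fun am => !(pvMaskOf cand &&& am == pvMaskOf cand))
            && (pvMaskOf cand &&& st.2 == 0) then
          (st.1 + 1, st.2 ||| pvMaskOf cand)
        else st) st) st0
    = (L.flatMap (fun i => pvCombs i (List.range cols))).foldl
        (fun (st : Int × Nat) cand =>
          if (((pvPairs relation).map (fun p => pvAgreeMask cols p.1 p.2)).all
                fun am => !(pvMaskOf cand &&& am == pvMaskOf cand))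
              && (pvMaskOf cand &&& st.2 == 0) then
            (st.1 + 1, st.2 ||| pvMaskOf cand)
          else st) st0 := by
  induction L with
  | nil => intro st0; rfl
  | cons i L' ih =>
    intro st0
    rw [List.foldl_cons, List.flatMap_cons, List.foldl_append, ih]

-- ===== VERDICT (by name: the statement is the Claim_ definition above) =====
theorem solution_spec : Claim_equal_solution := by
  intro relation _ _
  unfold Spec_solution
  show solution relation = solution_alt relation
  unfold solution solution_alt
  simp only []
  rw [pvA_collect, pvB_collect, List.nil_append]
  have h0 : ∀ (K : List (List Nat)),
      K.map (fun k => ((k : List Nat), false)) = K.map (fun k => (k, pvOver [] k)) := by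
    intro K; rfl
  rw [h0, pvCore]
  have hS : ∀ c ∈ (List.range' 1 (relation.headI.length - 1)).flatMap
      (fun i => pvCombs i (List.range relation.headI.length)),
      c.Sublist (List.range relation.headI.length) := by
    intro c hc
    obtain ⟨i, _, hci⟩ := List.mem_flatMap.mp hc
    exact pvCombs_sublist _ i c hci
  exact (pvBridge relation relation.headI.length _ hS [] 0).symm
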